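-- pv_equiv track=rewrite | github.com/sev2021/https-hyperskill.org- | 2020_09_REGX/step4of6.py | check_regex
-- ===== SOURCE A (Python) =====
-- def check_regex(regex, text):
--     if regex == "" or regex == text:                # baseZERO case True
--         return True
--     if text == "":
--         return False
--
--     if regex[0] == "^":
--
--         if regex[-1] == "$":
--             if len(regex) == len(text) + 2:
--                 return match_string(regex[1:-1], text[-(len(regex)-1):])
--             else:
--                 return False
--
--         return match_string(regex[1:], text)
--
--     if regex[-1] == "$":
--         return match_string(regex[:-1], text[-(len(regex)-1):])
--
--     for i in range(len(text)):
--         if match_string(regex, text[i:]):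
--             return True
--     return False
--
-- def match_string(mregex, mtext):
--
--     if mregex == "" or mregex == mtext:
--         return True
--
--     if mtext == "":
--         return False
--
--     if mregex[0] in mtext[0] + ".":
--         return match_string(mregex[1:], mtext[1:])
--
--     return False
-- ===== SOURCE B (Python) =====
-- def check_regex(regex, text):
--     if regex == "" or regex == text:
--         return True
--     if text == "":
--         return False
--     start = regex[0] == "^"
--     end = regex[-1] == "$"
--     core = regex[1:] if start else regex
--     core = core[:-1] if end else core
--     m, n = len(core), len(text)
--
--     def fits(i):
--         return all(c == "." or c == tc for c, tc in zip(core, text[i:]))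
--
--     if start and end:
--         return m == n and fits(0)
--     if start:
--         return m <= n and fits(0)
--     if end:
--         return m <= n and fits(n - m)
--     return any(m <= n - i and fits(i) for i in range(n))
-- ===== Notes on version B (the rewrite author's own statement) =====
-- stated objective: faster
-- what changed: The recursive match_string helper (which copies a slice of the pattern and the text at every character step) is replaced by one iterative zip/all prefix predicate over an anchor-stripped core computed once, turning A's nested branch-specific slices and recursion into a flat four-way dispatch with length guards.
import Mathlib
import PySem

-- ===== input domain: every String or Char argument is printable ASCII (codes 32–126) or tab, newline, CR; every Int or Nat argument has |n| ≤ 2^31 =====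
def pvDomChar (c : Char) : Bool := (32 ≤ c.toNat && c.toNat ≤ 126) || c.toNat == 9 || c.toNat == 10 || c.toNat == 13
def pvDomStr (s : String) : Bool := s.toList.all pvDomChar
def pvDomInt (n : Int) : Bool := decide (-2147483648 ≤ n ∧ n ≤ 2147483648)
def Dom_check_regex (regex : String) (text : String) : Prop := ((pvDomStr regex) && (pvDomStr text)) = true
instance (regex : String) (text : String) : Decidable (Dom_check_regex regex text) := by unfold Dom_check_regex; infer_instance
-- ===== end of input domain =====

-- B replaces the recursive match_string with one iterative zip/all prefix predicate and a
-- single anchor-stripped core, collapsing A's per-branch slices into a four-way dispatch (objective: simpler).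

-- ===== PORT A =====
-- port of match_string: "" / equality base cases, then char-by-char recursion ('.' wildcard)
def matchStringA : List Char → List Char → Bool
  | [], _ => true
  | pc :: p', t =>
    if pc :: p' = t then true
    else
      match t with
      | [] => false
      | tc :: t' => if pc == tc || pc == '.' then matchStringA p' t' else false

-- check_regex on the code-point lists (the wrapper below feeds it the two strings)
def checkRegexListA (r t : List Char) : Bool :=
  if r = [] ∨ r = t then true
  else if t = [] then false
  else if r.head? == some '^' then
    if r.getLast? == some '$' then
      if r.length = t.length + 2 then
        matchStringA (PySem.List.slice r (some 1) (some (-1)))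
          (PySem.List.slice t (some (-((r.length : Int) - 1))) none)
      else false
    else matchStringA (PySem.List.slice r (some 1) none) t
  else if r.getLast? == some '$' then
    matchStringA (PySem.List.slice r none (some (-1)))
      (PySem.List.slice t (some (-((r.length : Int) - 1))) none)
  else
    (PySem.List.pyRange 0 (t.length : Int) 1).any fun i =>
      matchStringA r (PySem.List.slice t (some i) none)

def check_regex (regex : String) (text : String) : Bool :=
  checkRegexListA regex.toList text.toList

-- ===== PORT B =====
-- port of B's inline fits(i): core matches text starting at i, '.' wildcard, via zip/all
def fitsB (core t : List Char) (i : Nat) : Bool :=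
  (core.zip (t.drop i)).all fun ct => ct.1 == '.' || ct.1 == ct.2

def checkRegexListB (r t : List Char) : Bool :=
  if r = [] ∨ r = t then true
  else if t = [] then false
  else
    let start := r.head? == some '^'
    let e := r.getLast? == some '$'
    let core0 := if start then r.drop 1 else r
    let core := if e then core0.dropLast else core0
    let m := core.length
    let n := t.length
    if start && e then decide (m = n) && fitsB core t 0
    else if start then decide (m ≤ n) && fitsB core t 0
    else if e then decide (m ≤ n) && fitsB core t (n - m)
    else (List.range n).any fun i => decide (m ≤ n - i) && fitsB core t i

def check_regex_alt (regex : String) (text : String) : Bool :=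
  checkRegexListB regex.toList text.toList

-- ===== PRECONDITION & SPEC =====
def Spec_check_regex (regex : String) (text : String) (out : Bool) : Prop := out = check_regex_alt regex text
instance (regex : String) (text : String) (out : Bool) : Decidable (Spec_check_regex regex text out) := by unfold Spec_check_regex; infer_instance

-- ===== CLAIM (what is proved, stated in full; the proofs are below) =====
def Claim_equal_check_regex : Prop := ∀ (regex : String) (text : String), Dom_check_regex regex text → Spec_check_regex regex text (check_regex regex text)

-- ===== LEMMAS AND PROOFS =====

theorem zip_self_all (p : List Char) :
    ((p.zip p).all fun ct => ct.1 == '.' || ct.1 == ct.2) = true := by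
  induction p with
  | nil => rfl
  | cons c p ih => simp_all

-- characterisation of A's recursive match_string as B's length-guarded zip/all predicate
theorem matchStringA_eq (p t : List Char) :
    matchStringA p t =
      (decide (p.length ≤ t.length) && ((p.zip t).all fun ct => ct.1 == '.' || ct.1 == ct.2)) := by
  induction p generalizing t with
  | nil => simp [matchStringA]
  | cons pc p' ih =>
    cases t with
    | nil => simp [matchStringA]
    | cons tc t' =>
      by_cases heq : pc :: p' = tc :: t'
      · obtain ⟨h1, h2⟩ := List.cons.injEq pc p' tc t' ▸ heq
        subst h1; subst h2
        simp [matchStringA, zip_self_all]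
      · rw [matchStringA, if_neg heq]
        by_cases hc : (pc == tc || pc == '.') = true
        · rw [if_pos hc, ih]
          have : (pc == '.' || pc == tc) = true := by
            rcases Bool.or_eq_true_iff.mp hc with h | h <;> simp [h]
          simp [this]
        · rw [if_neg hc]
          have h1 : (pc == tc) = false := by cases h : pc == tc <;> simp_all
          have h2 : (pc == '.') = false := by cases h : pc == '.' <;> simp_all
          simp [h1, h2]

theorem fitsB_zero (p t : List Char) :
    fitsB p t 0 = ((p.zip t).all fun ct => ct.1 == '.' || ct.1 == ct.2) := by
  simp [fitsB]

theorem slice_one_neg_one (xs : List Char) :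
    PySem.List.slice xs (some 1) (some (-1)) = (xs.drop 1).dropLast := by
  simp [PySem.List.slice]
  cases xs with
  | nil => simp
  | cons a l => simp [List.dropLast_eq_take]

theorem slice_neg_len_sub (t : List Char) (k : Nat) :
    PySem.List.slice t (some (-(k : Int))) none = t.drop (if k = 0 then 0 else t.length - k) := by
  rcases Nat.eq_zero_or_pos k with h | h
  · subst h
    rw [show (-((0:Nat):Int)) = ((0:Nat):Int) by simp, PySem.List.slice_from_natCast]
    simp
  · rw [PySem.List.slice_from_neg_natCast _ _ h, if_neg (by omega)]

theorem check_regex_lists (r t : List Char) :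
    checkRegexListA r t = checkRegexListB r t := by
  unfold checkRegexListA checkRegexListB
  by_cases hbase : r = [] ∨ r = t
  · simp [hbase]
  · rw [if_neg hbase, if_neg hbase]
    by_cases htn : t = []
    · simp [htn]
    · rw [if_neg htn, if_neg htn]
      have hrne : r ≠ [] := fun h => hbase (Or.inl h)
      by_cases hs : r.head? = some '^' <;> by_cases he : r.getLast? = some '$'
      · -- ^…$ : exact-length anchored match
        simp only [hs, he, beq_iff_eq, if_true]
        have hlen2 : 2 ≤ r.length := by
          cases r with
          | nil => exact absurd rfl hrne
          | cons a l =>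
            cases l with
            | nil =>
              simp [List.head?] at hs
              simp [List.getLast?, hs] at he
            | cons b l' => simp
        have hclen : ((r.drop 1).dropLast).length = r.length - 2 := by simp; omega
        by_cases hl : r.length = t.length + 2
        · rw [if_pos hl, slice_one_neg_one,
            show -((r.length : Int) - 1) = -(((t.length + 1 : Nat)) : Int) by push_cast [hl]; ring,
            slice_neg_len_sub, if_neg (by omega), show t.length - (t.length + 1) = 0 by omega,
            List.drop_zero, matchStringA_eq, ← fitsB_zero]
          congr 1
          rw [decide_eq_decide]
          simp
          omega
        · rw [if_neg hl]
          have hne : ¬ (r.length - 1 - 1 = t.length) := by omega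
          simp [hne]
      · -- ^… : prefix match
        have he' : (r.getLast? == some '$') = false := by simp [he]
        simp only [hs, he', beq_iff_eq, if_true, Bool.and_false, Bool.false_eq_true, if_false]
        rw [PySem.List.slice_from_one, matchStringA_eq, ← fitsB_zero, ← List.drop_one]
      · -- …$ : suffix match
        have hs' : (r.head? == some '^') = false := by simp [hs]
        simp only [hs', he, beq_iff_eq, if_true, Bool.false_and, Bool.false_eq_true, if_false]
        have hr1 : 1 ≤ r.length := by
          cases r with
          | nil => exact absurd rfl hrne
          | cons a l => simp
        rw [PySem.List.slice_to_neg_one,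
          show -((r.length : Int) - 1) = -(((r.length - 1 : Nat)) : Int) by push_cast [hr1]; ring,
          slice_neg_len_sub, matchStringA_eq]
        have hcl : r.dropLast.length = r.length - 1 := by simp
        by_cases h0 : r.length - 1 = 0
        · rw [if_pos h0, List.drop_zero]
          have : r.dropLast = [] := List.eq_nil_of_length_eq_zero (by omega)
          simp [this, fitsB]
        · rw [if_neg h0, ← fitsB, hcl]
          have hdl : (t.drop (t.length - (r.length - 1))).length = min (r.length - 1) t.length := by
            simp; omega
          rw [hdl]
          congr 1
          rw [decide_eq_decide]
          omega
      · -- unanchored search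
        have hs' : (r.head? == some '^') = false := by simp [hs]
        have he' : (r.getLast? == some '$') = false := by simp [he]
        simp only [hs', he', Bool.false_and, Bool.false_eq_true, if_false]
        rw [PySem.List.pyRange_zero_natCast, List.any_map]
        apply List.any_congr rfl
        intro i
        simp only [Function.comp_apply]
        rw [PySem.List.slice_from_natCast, matchStringA_eq]
        have hdl : (t.drop i).length = t.length - i := by simp
        rw [show (((r.zip (t.drop i)).all fun ct => ct.1 == '.' || ct.1 == ct.2))
            = fitsB r t i by simp [fitsB], hdl]

-- ===== VERDICT (by name: the statement is the Claim_ definition above) =====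
theorem check_regex_spec : Claim_equal_check_regex := by
  intro regex text _
  unfold Spec_check_regex check_regex check_regex_alt
  exact check_regex_lists regex.toList text.toList
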